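-- pv_equiv track=rewrite | github.com/Chamartin3/AdventOfCode2023 | day_1.py | get_first_substrnum
-- ===== SOURCE A (Python) =====
-- from ast import Tuple
-- from typing import List, Callable, Optional, Tuple
--
-- string_numbers = [
--     "one",
--     "two",
--     "three",
--     "four",
--     "five",
--     "six",
--     "seven",
--     "eight",
--     "nine",
-- ]
--
-- def get_first_substrnum(txt: str, inverse: bool = False) -> Tuple[Optional[int], str]:
--     found_idx = None
--     found_num = ""
--     found = []
--     for numidx, num in enumerate(string_numbers):
--         num_to_find = num[::-1] if inverse else num
--         idx = txt.find(num_to_find)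
--         if idx >= 0:
--             found.append((num, idx))
--             if found_idx is None or idx < found_idx:
--                 found_idx = idx
--                 found_num = numidx + 1
--
--     return found_idx, f"{found_num}"
-- ===== SOURCE B (Python) =====
-- string_numbers = [
--     "one",
--     "two",
--     "three",
--     "four",
--     "five",
--     "six",
--     "seven",
--     "eight",
--     "nine",
-- ]
--
-- def get_first_substrnum(txt: str, inverse: bool = False):
--     words = [(num[::-1] if inverse else num, str(i + 1))
--              for i, num in enumerate(string_numbers)]
--     for i in range(len(txt)):
--         for word, digit in words:
--             if txt.startswith(word, i):
--                 return i, digit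
--     return None, ""
-- ===== Notes on version B (the rewrite author's own statement) =====
-- stated objective: alternative
-- what changed: B replaces A's nine independent full str.find scans plus running-minimum bookkeeping by a single left-to-right positional scan that checks txt.startswith(word, i) at each index and returns at the first match.
import Mathlib
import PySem

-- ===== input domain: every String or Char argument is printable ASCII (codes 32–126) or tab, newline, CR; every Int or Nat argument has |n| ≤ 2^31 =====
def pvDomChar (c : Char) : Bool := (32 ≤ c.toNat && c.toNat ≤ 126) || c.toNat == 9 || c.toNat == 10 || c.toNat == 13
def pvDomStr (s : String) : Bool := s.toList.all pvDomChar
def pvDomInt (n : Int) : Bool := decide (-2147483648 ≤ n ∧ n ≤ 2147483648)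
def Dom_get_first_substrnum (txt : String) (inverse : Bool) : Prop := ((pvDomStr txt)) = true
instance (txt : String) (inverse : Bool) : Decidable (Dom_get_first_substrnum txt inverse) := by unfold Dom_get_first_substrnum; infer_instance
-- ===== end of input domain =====

-- B replaces A's nine full str.find scans + running minimum by one left-to-right
-- positional scan with early exit (alternative decomposition, same asymptotic cost).


-- ===== PORT A =====
-- string_numbers
def pvStringNumbers : List String :=
  ["one", "two", "three", "four", "five", "six", "seven", "eight", "nine"]

-- one iteration of A's for-loop; state = (found_idx, found_num (already stringified), found)
def pvStepA (t : List Char) (inverse : Bool)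
    (acc : Option Int × String × List (String × Int)) (p : Int × String) :
    Option Int × String × List (String × Int) :=
  -- num[::-1] if inverse else num  (slice?_none_none_neg_one: xs[::-1])
  let numToFind : List Char :=
    if inverse then (PySem.List.slice? p.2.toList none none (-1)).getD [] else p.2.toList
  let idx : Int := PySem.Chars.find t numToFind
  if 0 ≤ idx then
    let found := acc.2.2 ++ [(p.2, idx)]
    match acc.1 with
    | none => (some idx, PySem.Int.toStr (p.1 + 1), found)
    | some fi =>
        if idx < fi then (some idx, PySem.Int.toStr (p.1 + 1), found)
        else (acc.1, acc.2.1, found)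
  else acc

def get_first_substrnum (txt : String) (inverse : Bool) : Option Int × String :=
  let r := (PySem.List.enumerate pvStringNumbers).foldl (pvStepA txt.toList inverse) (none, "", [])
  (r.1, r.2.1)

-- ===== PORT B =====
-- the comprehension building the [(word, digit)] pairs
def pvWordPairs (inverse : Bool) : List (List Char × String) :=
  (PySem.List.enumerate pvStringNumbers).map (fun p =>
    ((if inverse then (PySem.List.slice? p.2.toList none none (-1)).getD [] else p.2.toList),
     PySem.Int.toStr (p.1 + 1)))

-- 'for i in range(len(txt)): for word, digit in words: if txt.startswith(word, i): return i, digit'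
-- as structural recursion on the suffix of txt that starts at position i
def pvScan (words : List (List Char × String)) : List Char → Nat → Option Int × String
  | [], _ => (none, "")
  | c :: rest, i =>
    match words.find? (fun wd => PySem.Chars.startswith (c :: rest) wd.1) with
    | some wd => (some (i : Int), wd.2)
    | none => pvScan words rest (i + 1)

def get_first_substrnum_alt (txt : String) (inverse : Bool) : Option Int × String :=
  pvScan (pvWordPairs inverse) txt.toList 0

-- ===== PRECONDITION & SPEC =====
def Spec_get_first_substrnum (txt : String) (inverse : Bool) (out : Option Int × String) : Prop := out = get_first_substrnum_alt txt inverse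
instance (txt : String) (inverse : Bool) (out : Option Int × String) : Decidable (Spec_get_first_substrnum txt inverse out) := by unfold Spec_get_first_substrnum; infer_instance

-- ===== CLAIM (what is proved, stated in full; the proofs are below) =====
def Claim_equal_get_first_substrnum : Prop := ∀ (txt : String) (inverse : Bool), Dom_get_first_substrnum txt inverse → Spec_get_first_substrnum txt inverse (get_first_substrnum txt inverse)

-- ===== LEMMAS AND PROOFS =====

-- "best so far" combination A's loop maintains: keep a unless b has a strictly smaller index
def pvMerge : Option Int × String → Option Int × String → Option Int × String
  | a, (none, _) => a
  | (none, _), b => b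
  | (some i, s), (some j, u) => if j < i then (some j, u) else (some i, s)

-- contribution of a single (word, digit) pair
def pvElem (t : List Char) (wd : List Char × String) : Option Int × String :=
  if PySem.Chars.find t wd.1 < 0 then (none, "") else (some (PySem.Chars.find t wd.1), wd.2)

-- right-to-left accumulation of pvMerge over the word list
def pvBest (t : List Char) : List (List Char × String) → Option Int × String
  | [] => (none, "")
  | wd :: ws => pvMerge (pvElem t wd) (pvBest t ws)

theorem pvMerge_assoc (a b c : Option Int × String) :
    pvMerge (pvMerge a b) c = pvMerge a (pvMerge b c) := by
  rcases a with ⟨_ | i, a2⟩ <;> rcases b with ⟨_ | j, b2⟩ <;> rcases c with ⟨_ | k, c2⟩ <;>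
    simp only [pvMerge] <;> (first
      | rfl
      | (split_ifs <;> simp only [pvMerge] <;> (try split_ifs) <;> first | rfl | (exfalso; omega)))

theorem pvStepA_proj (t : List Char) (inverse : Bool)
    (acc : Option Int × String × List (String × Int)) (p : Int × String) :
    ((pvStepA t inverse acc p).1, (pvStepA t inverse acc p).2.1) =
      pvMerge (acc.1, acc.2.1)
        (pvElem t ((if inverse then (PySem.List.slice? p.2.toList none none (-1)).getD [] else p.2.toList),
                   PySem.Int.toStr (p.1 + 1))) := by
  rcases acc with ⟨a1, a2, a3⟩
  simp only [pvStepA, pvElem, pvMerge]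
  by_cases h : (0:Int) ≤ PySem.Chars.find t (if inverse then (PySem.List.slice? p.2.toList none none (-1)).getD [] else p.2.toList)
  · rcases a1 with _ | fi
    · simp [h, not_lt.mpr h]
    · simp only [if_pos h, if_neg (not_lt.mpr h)]
      split_ifs <;> rfl
  · rcases a1 with _ | fi <;> simp [h, lt_of_not_ge h]

theorem foldA_eq (t : List Char) (inverse : Bool) :
    ∀ (ws : List (Int × String)) (acc : Option Int × String × List (String × Int)),
      ((ws.foldl (pvStepA t inverse) acc).1, (ws.foldl (pvStepA t inverse) acc).2.1) =
        pvMerge (acc.1, acc.2.1)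
          (pvBest t (ws.map (fun p =>
            ((if inverse then (PySem.List.slice? p.2.toList none none (-1)).getD [] else p.2.toList),
             PySem.Int.toStr (p.1 + 1)))))
  | [], acc => by simp [pvBest, pvMerge]
  | p :: ps, acc => by
    simp only [List.foldl_cons, List.map_cons, pvBest]
    rw [foldA_eq t inverse ps (pvStepA t inverse acc p), pvStepA_proj, pvMerge_assoc]

-- if pvBest finds nothing, no word of the list occurs in t
theorem pvBest_none (t : List Char) :
    ∀ ws : List (List Char × String), (pvBest t ws).1 = none →
      ∀ wd ∈ ws, PySem.Chars.find t wd.1 < 0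
  | [], _, wd, h => by simp at h
  | w :: ws, hn, wd, h => by
    rcases hbb : pvBest t ws with ⟨b1, b2⟩
    simp only [pvBest, pvElem, hbb] at hn
    by_cases hf : PySem.Chars.find t w.1 < 0
    · rw [if_pos hf] at hn
      rcases b1 with _ | j
      · rcases List.mem_cons.mp h with h' | h'
        · exact h' ▸ hf
        · exact pvBest_none t ws (by rw [hbb]) wd h'
      · simp only [pvMerge] at hn
        simp at hn
    · rw [if_neg hf] at hn
      rcases b1 with _ | j
      · simp only [pvMerge] at hn
        simp at hn
      · simp only [pvMerge] at hn
        split_ifs at hn <;> simp at hn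

theorem pvBest_some (t : List Char) :
    ∀ (ws : List (List Char × String)) (m : Int) (d : String),
      pvBest t ws = (some m, d) →
      0 ≤ m ∧ (∀ wd ∈ ws, 0 ≤ PySem.Chars.find t wd.1 → m ≤ PySem.Chars.find t wd.1) ∧
      ∃ w0, ws.find? (fun wd => PySem.Chars.find t wd.1 == m) = some w0 ∧ w0.2 = d
  | [], m, d, h => by simp [pvBest] at h
  | w :: ws, m, d, h => by
    rcases hbb : pvBest t ws with ⟨b1, b2⟩
    simp only [pvBest, pvElem, hbb] at h
    by_cases hf : PySem.Chars.find t w.1 < 0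
    · -- head contributes (none, "")
      rw [if_pos hf] at h
      rcases b1 with _ | j
      · simp only [pvMerge] at h
        simp at h
      · obtain ⟨hm, hmin, w0, hw0, hd⟩ := pvBest_some t ws j b2 hbb
        simp only [pvMerge, Prod.mk.injEq, Option.some.injEq] at h
        obtain ⟨hj, hb2⟩ := h
        subst hj; subst hb2
        refine ⟨hm, ?_, w0, ?_, hd⟩
        · intro wd hwd hge
          rcases List.mem_cons.mp hwd with h' | h'
          · subst h'; omega
          · exact hmin wd h' hge
        · rw [List.find?_cons_of_neg (by simp; omega), hw0]
    · replace hf := not_lt.mp hf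
      rw [if_neg (not_lt.mpr hf)] at h
      rcases b1 with _ | j
      · -- tail found nothing: result is the head
        simp only [pvMerge, Prod.mk.injEq, Option.some.injEq] at h
        obtain ⟨hj, hb2⟩ := h
        refine ⟨hj ▸ hf, ?_, w, ?_, hb2⟩
        · intro wd hwd hge
          rcases List.mem_cons.mp hwd with h' | h'
          · subst h'; omega
          · have := pvBest_none t ws (by rw [hbb]) wd h'; omega
        · rw [List.find?_cons_of_pos (by simp [hj])]
      · obtain ⟨hm, hmin, w0, hw0, hd⟩ := pvBest_some t ws j b2 hbb
        simp only [pvMerge] at h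
        by_cases hlt : j < PySem.Chars.find t w.1
        · rw [if_pos hlt] at h
          simp only [Prod.mk.injEq, Option.some.injEq] at h
          obtain ⟨hj, hb2⟩ := h
          subst hj; subst hb2
          refine ⟨hm, ?_, w0, ?_, hd⟩
          · intro wd hwd hge
            rcases List.mem_cons.mp hwd with h' | h'
            · subst h'; omega
            · exact hmin wd h' hge
          · rw [List.find?_cons_of_neg (by simp; omega), hw0]
        · rw [if_neg hlt] at h
          simp only [Prod.mk.injEq, Option.some.injEq] at h
          obtain ⟨hj, hb2⟩ := h
          refine ⟨hj ▸ hf, ?_, w, ?_, hb2⟩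
          · intro wd hwd hge
            rcases List.mem_cons.mp hwd with h' | h'
            · subst h'; omega
            · have := hmin wd h' hge; omega
          · rw [List.find?_cons_of_pos (by simp [hj])]

-- a word matching at position j has its first occurrence at or before j
theorem find_le_of_prefix_drop (t w : List Char) (j : Nat) (h : w <+: t.drop j) :
    0 ≤ PySem.Chars.find t w ∧ (PySem.Chars.find t w).toNat ≤ j := by
  have hinf : w <:+: t := h.isInfix.trans (List.drop_suffix j t).isInfix
  have h0 : 0 ≤ PySem.Chars.find t w := (PySem.Chars.find_nonneg_iff t w).mpr hinf
  refine ⟨h0, ?_⟩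
  by_contra hgt
  exact (PySem.Chars.find_spec h0).2 j (by omega) h

-- find? only looks at the predicate's values on the list's elements
theorem pvFind?_congr {α : Type} (p q : α → Bool) :
    ∀ l : List α, (∀ a ∈ l, p a = q a) → l.find? p = l.find? q
  | [], _ => rfl
  | a :: l, h => by
    have ha := h a (by simp)
    by_cases hp : p a
    · rw [List.find?_cons_of_pos hp, List.find?_cons_of_pos (ha ▸ hp)]
    · rw [List.find?_cons_of_neg hp, List.find?_cons_of_neg (ha ▸ hp)]
      exact pvFind?_congr p q l (fun b hb => h b (by simp [hb]))

-- scan finds nothing when no word matches anywhere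
theorem pvScan_none (W : List (List Char × String)) :
    ∀ (t : List Char) (i : Nat),
      (∀ j, ∀ wd ∈ W, ¬ wd.1 <+: t.drop j) → pvScan W t i = (none, "")
  | [], _, _ => rfl
  | c :: rest, i, h => by
    simp only [pvScan]
    have hfind : W.find? (fun wd => PySem.Chars.startswith (c :: rest) wd.1) = none := by
      rw [List.find?_eq_none]
      intro wd hwd
      simp only [Bool.not_eq_true]
      rw [← Bool.not_eq_true, PySem.Chars.startswith_iff]
      exact h 0 wd hwd
    rw [hfind]
    exact pvScan_none W rest (i + 1) (fun j wd hwd => by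
      have := h (j + 1) wd hwd
      simpa using this)

-- scan returns the first matching position, with the first matching word there
theorem pvScan_found (W : List (List Char × String)) (hne : ∀ wd ∈ W, wd.1 ≠ []) :
    ∀ (m : Nat) (t : List Char) (i : Nat) (w0 : List Char × String),
      W.find? (fun wd => PySem.Chars.startswith (t.drop m) wd.1) = some w0 →
      (∀ j, j < m → ∀ wd ∈ W, ¬ wd.1 <+: t.drop j) →
      pvScan W t i = (some ((i : Int) + (m : Int)), w0.2)
  | 0, t, i, w0, hfind, _ => by
    have hw0 := List.find?_some hfind
    simp only [PySem.Chars.startswith_iff] at hw0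
    rcases t with _ | ⟨c, rest⟩
    · exact absurd (List.prefix_nil.mp hw0) (hne w0 (List.mem_of_find?_eq_some hfind))
    · simp only [pvScan, List.drop_zero] at hfind ⊢
      rw [hfind]
      simp
  | m + 1, t, i, w0, hfind, hlt => by
    rcases t with _ | ⟨c, rest⟩
    · have hw0 := List.find?_some hfind
      simp only [PySem.Chars.startswith_iff, List.drop_nil] at hw0
      exact absurd (List.prefix_nil.mp hw0) (hne w0 (List.mem_of_find?_eq_some hfind))
    · simp only [pvScan]
      have h0 : W.find? (fun wd => PySem.Chars.startswith (c :: rest) wd.1) = none := by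
        rw [List.find?_eq_none]
        intro wd hwd
        simp only [Bool.not_eq_true]
        rw [← Bool.not_eq_true, PySem.Chars.startswith_iff]
        exact hlt 0 (by omega) wd hwd
      rw [h0]
      have hrec := pvScan_found W hne m rest (i + 1) w0
        (by simpa using hfind)
        (fun j hj wd hwd => by
          have := hlt (j + 1) (by omega) wd hwd
          simpa using this)
      have hcast : ((i + 1 : Nat) : Int) + (m : Int) = (i : Int) + ((m + 1 : Nat) : Int) := by
        omega
      rw [hrec, hcast]

theorem pvWordPairs_ne_nil (inverse : Bool) : ∀ wd ∈ pvWordPairs inverse, wd.1 ≠ [] := by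
  cases inverse <;> decide

theorem get_first_substrnum_spec_aux (txt : String) (inverse : Bool) :
    get_first_substrnum txt inverse = get_first_substrnum_alt txt inverse := by
  unfold get_first_substrnum get_first_substrnum_alt
  set t := txt.toList with ht
  set W := pvWordPairs inverse with hW
  rw [foldA_eq t inverse]
  rw [show ((PySem.List.enumerate pvStringNumbers).map (fun p =>
      ((if inverse then (PySem.List.slice? p.2.toList none none (-1)).getD [] else p.2.toList),
       PySem.Int.toStr (p.1 + 1)))) = W from rfl]
  rcases hb : pvBest t W with ⟨b1, b2⟩
  rcases b1 with _ | m
  · -- nothing found by A; show B finds nothing either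
    simp only [pvMerge]
    rw [pvScan_none W t 0]
    intro j wd hwd hpre
    have hle := find_le_of_prefix_drop t wd.1 j hpre
    have := pvBest_none t W (by rw [hb]) wd hwd
    omega
  · obtain ⟨hm, hmin, w0, hw0, hd⟩ := pvBest_some t W m b2 hb
    simp only [pvMerge]
    have hcongr : W.find? (fun wd => PySem.Chars.startswith (t.drop m.toNat) wd.1) =
        W.find? (fun wd => PySem.Chars.find t wd.1 == m) := by
      apply pvFind?_congr
      intro wd hwd
      by_cases hp : wd.1 <+: t.drop m.toNat
      · have hle := find_le_of_prefix_drop t wd.1 m.toNat hp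
        have hge := hmin wd hwd hle.1
        have heq : PySem.Chars.find t wd.1 = m := by omega
        rw [(PySem.Chars.startswith_iff _ _).mpr hp]
        simp [heq]
      · have hne' : ¬ PySem.Chars.find t wd.1 = m := by
          intro heq
          exact hp (heq ▸ (PySem.Chars.find_spec (heq ▸ hm)).1)
        have hsw : PySem.Chars.startswith (t.drop m.toNat) wd.1 = false := by
          rw [← Bool.not_eq_true, PySem.Chars.startswith_iff]
          exact hp
        rw [hsw, eq_comm, beq_eq_false_iff_ne]
        exact hne'
    have hscan := pvScan_found W (pvWordPairs_ne_nil inverse) m.toNat t 0 w0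
      (by rw [hcongr, hw0])
      (fun j hj wd hwd hpre => by
        have hle := find_le_of_prefix_drop t wd.1 j hpre
        have := hmin wd hwd hle.1
        omega)
    rw [hscan, hd]
    congr 2
    omega

-- ===== VERDICT (by name: the statement is the Claim_ definition above) =====
theorem get_first_substrnum_spec : Claim_equal_get_first_substrnum := by
  intro txt inverse _
  exact get_first_substrnum_spec_aux txt inverse
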